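-- pv_equiv track=rewrite | github.com/remoppou/LangAndMetProg | Task2_var2/__init__.py | find_indexes_where_min_and_max_el
-- ===== SOURCE A (Python) =====
-- def find_indexes_where_min_and_max_el(matrix):
--     min_el = matrix[0][0]
--     max_el = matrix[0][0]
--     min_index = 0
--     max_index = len(matrix[0]) - 1
--     for i in range(len(matrix)):
--         for j in range(len(matrix[i])):
--             if matrix[i][j] <= min_el:
--                 min_el = matrix[i][j]
--                 min_index = j
--             if matrix[i][j] > max_el:
--                 max_el = matrix[i][j]
--                 max_index = j
--             if matrix[i][j] == max_el:
--                 if j < max_index: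
--                     max_index = j
--     return min_index, max_index
-- ===== SOURCE B (Python) =====
-- def find_indexes_where_min_and_max_el(matrix):
--     pairs = [(j, v) for row in matrix for j, v in enumerate(row)]
--     values = [v for j, v in pairs]
--     min_val = min(values)
--     max_val = max(values)
--     min_cols = [j for j, v in pairs if v == min_val]
--     max_cols = [j for j, v in pairs if v == max_val]
--     return min_cols[-1], min(max_cols)
-- ===== Notes on version B (the rewrite author's own statement) =====
-- stated objective: simpler
-- what changed: Replaces A's single stateful scan with four interacting running variables by a declarative decomposition: compute min/max of the flattened values, then read off the last column holding the min and the smallest column holding the max.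
import Mathlib
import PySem

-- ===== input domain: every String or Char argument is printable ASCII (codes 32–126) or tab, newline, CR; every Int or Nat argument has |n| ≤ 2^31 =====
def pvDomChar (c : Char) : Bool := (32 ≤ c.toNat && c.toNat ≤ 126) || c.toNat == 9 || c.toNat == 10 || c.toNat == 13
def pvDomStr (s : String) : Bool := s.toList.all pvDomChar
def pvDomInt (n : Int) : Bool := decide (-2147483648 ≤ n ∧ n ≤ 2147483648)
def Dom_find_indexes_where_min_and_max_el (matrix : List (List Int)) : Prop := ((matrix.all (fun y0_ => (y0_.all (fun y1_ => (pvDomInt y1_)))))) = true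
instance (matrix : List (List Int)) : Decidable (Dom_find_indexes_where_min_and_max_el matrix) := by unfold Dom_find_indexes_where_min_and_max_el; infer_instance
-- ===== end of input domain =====

-- B replaces A's one-pass scan with four running variables by a declarative decomposition
-- (min/max of the flattened values, then locate the last min column and smallest max column);
-- objective: simpler.  Equivalence is of return values on Pre_ (no argument is mutated).

-- ===== PORT A =====
-- the body of A's double for-loop, acting on the state (min_el, max_el, min_index, max_index);
-- the loop indices i, j with in-range accesses matrix[i][j] are realised by folding over the
-- rows and over enumerate(row) — the same elements in the same order.
def pvStepA (st : Int × Int × Int × Int) (p : Int × Int) : Int × Int × Int × Int :=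
  let j := p.1
  let v := p.2
  let min_el := st.1
  let max_el := st.2.1
  let min_index := st.2.2.1
  let max_index := st.2.2.2
  let min_el' := if v ≤ min_el then v else min_el
  let min_index' := if v ≤ min_el then j else min_index
  let max_el' := if max_el < v then v else max_el
  let max_index' := if max_el < v then j else max_index
  let max_index'' := if v = max_el' then (if j < max_index' then j else max_index') else max_index'
  (min_el', max_el', min_index', max_index'')

-- matrix[0][0] and len(matrix[0]) raise on an empty matrix / empty first row; Pre_ excludes
-- exactly those inputs, so headD/headD here is exact.
def find_indexes_where_min_and_max_el (matrix : List (List Int)) : Int × Int :=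
  let first := (matrix.headD []).headD 0
  let init : Int × Int × Int × Int := (first, first, 0, ((matrix.headD []).length : Int) - 1)
  let fin := matrix.foldl (fun st row => (PySem.List.enumerate row).foldl pvStepA st) init
  (fin.2.2.1, fin.2.2.2)

-- ===== PORT B =====
-- literal transliteration of Source B: flat (column, value) pairs, scalar min/max of the values,
-- then the matching columns.  min_cols[-1] and min(max_cols) act on lists that are nonempty
-- under Pre_, so getLastD 0 / (min? …).getD 0 are exact there.
def find_indexes_where_min_and_max_el_alt (matrix : List (List Int)) : Int × Int :=
  let pairs : List (Int × Int) := matrix.flatMap (fun row => PySem.List.enumerate row)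
  let values : List Int := pairs.map (·.2)
  let min_val : Int := (PySem.List.min? values (fun y => y)).getD 0
  let max_val : Int := (PySem.List.max? values (fun y => y)).getD 0
  let min_cols : List Int := pairs.filterMap (fun p => if p.2 = min_val then some p.1 else none)
  let max_cols : List Int := pairs.filterMap (fun p => if p.2 = max_val then some p.1 else none)
  (min_cols.getLastD 0, (PySem.List.min? max_cols (fun y => y)).getD 0)

-- ===== PRECONDITION & SPEC =====
-- A evaluates matrix[0][0]: it raises IndexError iff the matrix is empty or its first row is.
def Pre_find_indexes_where_min_and_max_el (matrix : List (List Int)) : Prop :=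
  matrix ≠ [] ∧ matrix.headD [] ≠ []
instance (matrix : List (List Int)) : Decidable (Pre_find_indexes_where_min_and_max_el matrix) := by unfold Pre_find_indexes_where_min_and_max_el; infer_instance
def pvWitness_find_indexes_where_min_and_max_el : List (List Int) := [[3, 1], [4, 1]]

def Spec_find_indexes_where_min_and_max_el (matrix : List (List Int)) (out : Int × Int) : Prop := out = find_indexes_where_min_and_max_el_alt matrix
instance (matrix : List (List Int)) (out : Int × Int) : Decidable (Spec_find_indexes_where_min_and_max_el matrix out) := by unfold Spec_find_indexes_where_min_and_max_el; infer_instance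

-- ===== CLAIM (what is proved, stated in full; the proofs are below) =====
def Claim_equal_find_indexes_where_min_and_max_el : Prop := ∀ (matrix : List (List Int)), Dom_find_indexes_where_min_and_max_el matrix → Pre_find_indexes_where_min_and_max_el matrix → Spec_find_indexes_where_min_and_max_el matrix (find_indexes_where_min_and_max_el matrix)
-- ===== LEMMAS AND PROOFS =====

-- min/max of a nonempty value list, as the running fold Python's min/max computes
def pvMnv : List Int → Int
  | [] => 0
  | v :: vs => vs.foldl min v
def pvMxv : List Int → Int
  | [] => 0
  | v :: vs => vs.foldl max v

def pvColsEq (S : List (Int × Int)) (c : Int) : List Int :=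
  S.filterMap (fun p => if p.2 = c then some p.1 else none)

-- the closed-form state A's scan maintains over the already-seen pairs S
def pvStA (S : List (Int × Int)) : Int × Int × Int × Int :=
  (pvMnv (S.map (·.2)), pvMxv (S.map (·.2)),
   (pvColsEq S (pvMnv (S.map (·.2)))).getLastD 0,
   pvMnv (pvColsEq S (pvMxv (S.map (·.2)))))

theorem pv_le_foldl_max_seed (vs : List Int) (v : Int) : v ≤ vs.foldl max v := by
  induction vs generalizing v with
  | nil => simp
  | cons x xs ih => exact le_trans (le_max_left _ _) (ih (max v x))

theorem pv_mem_le_foldl_max (vs : List Int) (v x : Int) (hx : x ∈ vs) : x ≤ vs.foldl max v := by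
  induction vs generalizing v with
  | nil => cases hx
  | cons y ys ih =>
    rcases List.mem_cons.mp hx with h | h
    · subst h; exact le_trans (le_max_right _ _) (pv_le_foldl_max_seed ys (max v x))
    · exact ih _ h

theorem pv_foldl_max_mem (vs : List Int) (v : Int) : vs.foldl max v = v ∨ vs.foldl max v ∈ vs := by
  induction vs generalizing v with
  | nil => left; rfl
  | cons x xs ih =>
    rcases ih (max v x) with h | h
    · rcases (show x ≤ v ∨ v < x by omega) with hvx | hvx
      · left; simpa [max_eq_left hvx] using h
      · right
        have hfoldl : (x :: xs).foldl max v = x := by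
          simpa [max_eq_right (le_of_lt hvx)] using h
        rw [hfoldl]; simp
    · right; exact List.mem_cons_of_mem _ h

theorem pvMxv_mem (vs : List Int) (h : vs ≠ []) : pvMxv vs ∈ vs := by
  cases vs with
  | nil => exact absurd rfl h
  | cons v t =>
    rcases pv_foldl_max_mem t v with h1 | h1
    · simp [pvMxv, h1]
    · exact List.mem_cons_of_mem _ (by simpa [pvMxv] using h1)

theorem pv_le_mxv (vs : List Int) (x : Int) (hx : x ∈ vs) : x ≤ pvMxv vs := by
  cases vs with
  | nil => cases hx
  | cons v t =>
    rcases List.mem_cons.mp hx with h | h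
    · subst h; exact pv_le_foldl_max_seed t x
    · exact pv_mem_le_foldl_max t v x h

theorem pvMnv_concat (vs : List Int) (h : vs ≠ []) (x : Int) :
    pvMnv (vs ++ [x]) = min (pvMnv vs) x := by
  cases vs with
  | nil => exact absurd rfl h
  | cons v t => simp [pvMnv, List.foldl_append]

theorem pvMxv_concat (vs : List Int) (h : vs ≠ []) (x : Int) :
    pvMxv (vs ++ [x]) = max (pvMxv vs) x := by
  cases vs with
  | nil => exact absurd rfl h
  | cons v t => simp [pvMxv, List.foldl_append]

theorem pvColsEq_append (S T : List (Int × Int)) (c : Int) :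
    pvColsEq (S ++ T) c = pvColsEq S c ++ pvColsEq T c := by
  simp [pvColsEq, List.filterMap_append]

theorem pvColsEq_singleton_eq (p : Int × Int) (c : Int) (h : p.2 = c) :
    pvColsEq [p] c = [p.1] := by simp [pvColsEq, h]

theorem pvColsEq_singleton_ne (p : Int × Int) (c : Int) (h : p.2 ≠ c) :
    pvColsEq [p] c = [] := by simp [pvColsEq, h]

theorem pvColsEq_ne_nil (S : List (Int × Int)) (c : Int) (h : c ∈ S.map (·.2)) :
    pvColsEq S c ≠ [] := by
  rcases List.mem_map.mp h with ⟨p, hp, hpc⟩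
  intro hnil
  have hmem : p.1 ∈ pvColsEq S c := by
    apply List.mem_filterMap.mpr
    exact ⟨p, hp, by simp [hpc]⟩
  rw [hnil] at hmem; cases hmem

theorem pvColsEq_eq_nil (S : List (Int × Int)) (c : Int) (h : ∀ p ∈ S, p.2 ≠ c) :
    pvColsEq S c = [] := by
  apply List.filterMap_eq_nil_iff.mpr
  intro p hp
  simp [h p hp]

theorem pv_map_concat (S : List (Int × Int)) (p : Int × Int) :
    (S ++ [p]).map (fun q => q.2) = S.map (fun q => q.2) ++ [p.2] := by simp

-- the four components of one step of A's scan, in closed form over the seen pairs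
theorem pvComp1 (S : List (Int × Int)) (hS : S ≠ []) (p : Int × Int) :
    (if p.2 ≤ pvMnv (S.map (·.2)) then p.2 else pvMnv (S.map (·.2)))
      = pvMnv ((S ++ [p]).map (·.2)) := by
  have hvs : S.map (·.2) ≠ [] := by simpa using hS
  rw [pv_map_concat, pvMnv_concat _ hvs]
  split_ifs with h
  · exact (min_eq_right h).symm
  · exact (min_eq_left (by omega)).symm

theorem pvComp2 (S : List (Int × Int)) (hS : S ≠ []) (p : Int × Int) :
    (if pvMxv (S.map (·.2)) < p.2 then p.2 else pvMxv (S.map (·.2)))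
      = pvMxv ((S ++ [p]).map (·.2)) := by
  have hvs : S.map (·.2) ≠ [] := by simpa using hS
  rw [pv_map_concat, pvMxv_concat _ hvs]
  split_ifs with h
  · exact (max_eq_right (le_of_lt h)).symm
  · exact (max_eq_left (by omega)).symm

theorem pvComp3 (S : List (Int × Int)) (hS : S ≠ []) (p : Int × Int) :
    (if p.2 ≤ pvMnv (S.map (·.2)) then p.1 else (pvColsEq S (pvMnv (S.map (·.2)))).getLastD 0)
      = (pvColsEq (S ++ [p]) (pvMnv ((S ++ [p]).map (·.2)))).getLastD 0 := by
  have hvs : S.map (·.2) ≠ [] := by simpa using hS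
  rw [pv_map_concat, pvMnv_concat _ hvs]
  split_ifs with h
  · rw [min_eq_right h, pvColsEq_append, pvColsEq_singleton_eq p p.2 rfl]
    rw [← List.concat_eq_append]
    simp
  · rw [min_eq_left (by omega : pvMnv (S.map (·.2)) ≤ p.2), pvColsEq_append,
      pvColsEq_singleton_ne p _ (fun hc => h (le_of_eq hc)), List.append_nil]

theorem pvComp4 (S : List (Int × Int)) (hS : S ≠ []) (p : Int × Int) :
    (if p.2 = (if pvMxv (S.map (·.2)) < p.2 then p.2 else pvMxv (S.map (·.2)))
      then (if p.1 < (if pvMxv (S.map (·.2)) < p.2 then p.1 else pvMnv (pvColsEq S (pvMxv (S.map (·.2)))))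
              then p.1
              else (if pvMxv (S.map (·.2)) < p.2 then p.1 else pvMnv (pvColsEq S (pvMxv (S.map (·.2))))))
      else (if pvMxv (S.map (·.2)) < p.2 then p.1 else pvMnv (pvColsEq S (pvMxv (S.map (·.2))))))
      = pvMnv (pvColsEq (S ++ [p]) (pvMxv ((S ++ [p]).map (·.2)))) := by
  have hvs : S.map (·.2) ≠ [] := by simpa using hS
  rw [pv_map_concat, pvMxv_concat _ hvs]
  by_cases h2 : pvMxv (S.map (·.2)) < p.2
  · rw [max_eq_right (le_of_lt h2)]
    have hnil : pvColsEq S p.2 = [] := by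
      apply pvColsEq_eq_nil; intro q hq hc
      have hle : q.2 ≤ pvMxv (S.map (·.2)) := pv_le_mxv _ q.2 (List.mem_map.mpr ⟨q, hq, rfl⟩)
      omega
    rw [pvColsEq_append, hnil, List.nil_append, pvColsEq_singleton_eq p p.2 rfl]
    simp [h2, pvMnv]
  · rw [max_eq_left (by omega : p.2 ≤ pvMxv (S.map (·.2)))]
    by_cases h3 : p.2 = pvMxv (S.map (·.2))
    · rw [pvColsEq_append, pvColsEq_singleton_eq p _ h3]
      have hcne : pvColsEq S (pvMxv (S.map (·.2))) ≠ [] :=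
        pvColsEq_ne_nil S _ (pvMxv_mem _ hvs)
      rw [pvMnv_concat _ hcne]
      simp only [if_neg h2, if_pos h3]
      split_ifs with h4
      · exact (min_eq_right (by omega)).symm
      · exact (min_eq_left (by omega)).symm
    · rw [pvColsEq_append, pvColsEq_singleton_ne p _ h3, List.append_nil]
      simp [h2, h3]

-- one step of A's scan preserves the closed-form state
theorem pvStepA_stA (S : List (Int × Int)) (hS : S ≠ []) (p : Int × Int) :
    pvStepA (pvStA S) p = pvStA (S ++ [p]) := by
  exact Prod.ext (pvComp1 S hS p)
    (Prod.ext (pvComp2 S hS p) (Prod.ext (pvComp3 S hS p) (pvComp4 S hS p)))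

theorem pv_foldl_stA (L S : List (Int × Int)) (hS : S ≠ []) :
    L.foldl pvStepA (pvStA S) = pvStA (S ++ L) := by
  induction L generalizing S with
  | nil => simp
  | cons p T ih =>
    calc (p :: T).foldl pvStepA (pvStA S)
        = T.foldl pvStepA (pvStepA (pvStA S) p) := rfl
      _ = T.foldl pvStepA (pvStA (S ++ [p])) := by rw [pvStepA_stA S hS p]
      _ = pvStA ((S ++ [p]) ++ T) := ih (S ++ [p]) (by simp)
      _ = pvStA (S ++ p :: T) := by simp

theorem pv_foldl_flatMap {α β σ : Type} (f : σ → β → σ) (g : α → List β)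
    (l : List α) (init : σ) :
    l.foldl (fun st x => (g x).foldl f st) init = (l.flatMap g).foldl f init := by
  induction l generalizing init with
  | nil => rfl
  | cons x xs ih => simp [List.flatMap_cons, List.foldl_append, ih]

-- the very first step from A's initial state lands in the closed form
theorem pv_first_step (a : Int) (r0 : List Int) :
    pvStepA (a, a, 0, ((a :: r0).length : Int) - 1) (0, a) = pvStA [(0, a)] := by
  refine Prod.ext ?_ (Prod.ext ?_ (Prod.ext ?_ ?_))
  · show (if (a : Int) ≤ a then a else a) = pvMnv [a]
    simp [pvMnv]
  · show (if (a : Int) < a then a else a) = pvMxv [a]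
    simp [pvMxv]
  · show (if (a : Int) ≤ a then (0 : Int) else 0) = (pvColsEq [(0, a)] (pvMnv [a])).getLastD 0
    simp [pvMnv, pvColsEq]
  · show (if a = (if (a : Int) < a then a else a)
      then (if (0 : Int) < (if (a : Int) < a then (0 : Int) else ((a :: r0).length : Int) - 1)
              then (0 : Int)
              else (if (a : Int) < a then (0 : Int) else ((a :: r0).length : Int) - 1))
      else (if (a : Int) < a then (0 : Int) else ((a :: r0).length : Int) - 1))
      = pvMnv (pvColsEq [(0, a)] (pvMxv [a]))
    have hlt : ¬ ((a : Int) < a) := lt_irrefl a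
    simp only [if_neg hlt]
    have : pvMnv (pvColsEq [(0, a)] (pvMxv [a])) = 0 := by simp [pvMnv, pvMxv, pvColsEq]
    rw [this]
    simp only [List.length_cons]
    split_ifs with h1 h2
    · rfl
    · push_cast at h2 ⊢
      omega
    all_goals exact absurd trivial (by assumption)

theorem pv_min?_getD (l : List Int) (h : l ≠ []) :
    (PySem.List.min? l (fun y => y)).getD 0 = pvMnv l := by
  cases l with
  | nil => exact absurd rfl h
  | cons v t => rw [PySem.List.min?_id_cons]; rfl

theorem pv_max?_getD (l : List Int) (h : l ≠ []) :
    (PySem.List.max? l (fun y => y)).getD 0 = pvMxv l := by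
  cases l with
  | nil => exact absurd rfl h
  | cons v t => rw [PySem.List.max?_id_cons]; rfl

-- B computes exactly the last two components of the closed-form state over the flat pairs
theorem pv_alt_eq_stA (matrix : List (List Int))
    (hne : matrix.flatMap (fun row => PySem.List.enumerate row) ≠ []) :
    find_indexes_where_min_and_max_el_alt matrix
      = ((pvStA (matrix.flatMap (fun row => PySem.List.enumerate row))).2.2.1,
         (pvStA (matrix.flatMap (fun row => PySem.List.enumerate row))).2.2.2) := by
  have hvne : (matrix.flatMap (fun row => PySem.List.enumerate row)).map (·.2) ≠ [] := by
    simpa using hne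
  simp only [find_indexes_where_min_and_max_el_alt]
  rw [pv_min?_getD _ hvne, pv_max?_getD _ hvne]
  have hmaxmem : pvMxv ((matrix.flatMap (fun row => PySem.List.enumerate row)).map (·.2))
      ∈ (matrix.flatMap (fun row => PySem.List.enumerate row)).map (·.2) := pvMxv_mem _ hvne
  have hcne := pvColsEq_ne_nil _ _ hmaxmem
  rw [pv_min?_getD _ (by simpa [pvColsEq] using hcne)]
  simp [pvStA, pvColsEq]

-- ===== VERDICT (by name: the statement is the Claim_ definition above) =====
theorem find_indexes_where_min_and_max_el_spec : Claim_equal_find_indexes_where_min_and_max_el := by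
  unfold Claim_equal_find_indexes_where_min_and_max_el
  intro matrix _ hpre
  obtain ⟨hne, hrow⟩ := hpre
  obtain ⟨row0, rows, rfl⟩ := List.exists_cons_of_ne_nil hne
  obtain ⟨a, r0, rfl⟩ := List.exists_cons_of_ne_nil (by simpa using hrow)
  unfold Spec_find_indexes_where_min_and_max_el
  have hflat := pv_foldl_flatMap pvStepA (fun row => PySem.List.enumerate row)
      ((a :: r0) :: rows)
      ((a, a, 0, (((a :: r0).length : Int) - 1)) : Int × Int × Int × Int)
  have hpairs_cons : ((a :: r0) :: rows).flatMap (fun row => PySem.List.enumerate row)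
      = (0, a) :: (PySem.List.enumerate r0 1
          ++ rows.flatMap (fun row => PySem.List.enumerate row)) := by
    simp [List.flatMap_cons, PySem.List.enumerate_cons]
  have hAfold : find_indexes_where_min_and_max_el ((a :: r0) :: rows)
      = ((pvStA (((a :: r0) :: rows).flatMap (fun row => PySem.List.enumerate row))).2.2.1,
         (pvStA (((a :: r0) :: rows).flatMap (fun row => PySem.List.enumerate row))).2.2.2) := by
    simp only [find_indexes_where_min_and_max_el, List.headD_cons]
    rw [hflat, hpairs_cons, List.foldl_cons, pv_first_step a r0,
      pv_foldl_stA _ [(0, a)] (by simp)]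
    rfl
  rw [hAfold, pv_alt_eq_stA ((a :: r0) :: rows) (by rw [hpairs_cons]; simp)]
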